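-- pv_equiv track=rewrite | github.com/Dietetics/Q3 | frites.py | get_conflicts_for_k
-- ===== SOURCE A (Python) =====
-- _conflict_cache = {}
--
-- def get_conflicts_for_k(points, k):
--     """Get cached conflicts for given points and k"""
--     points_key = tuple(sorted(points))
--     cache_key = (points_key, k)
--
--     if cache_key in _conflict_cache:
--         return _conflict_cache[cache_key]
--
--     n = len(points)
--     h_conflicts = set()  # pairs that can't both be horizontal
--     v_conflicts = set()  # pairs that can't both be vertical
--     impossible_pairs = set()  # pairs that can't coexist
--
--     for i in range(n):
--         for j in range(i + 1, n):
--             x1, y1 = points[i]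
--             x2, y2 = points[j]
--
--             # Check horizontal conflict
--             h_conflict = (y1 == y2 and abs(x1 - x2) < 2 * k + 1)
--             # Check vertical conflict
--             v_conflict = (x1 == x2 and abs(y1 - y2) < 2 * k + 1)
--
--             if h_conflict and v_conflict:
--                 impossible_pairs.add((i, j))
--             elif h_conflict:
--                 h_conflicts.add((i, j))
--             elif v_conflict:
--                 v_conflicts.add((i, j))
--
--     result = (h_conflicts, v_conflicts, impossible_pairs)
--     _conflict_cache[cache_key] = result
--     return result
-- ===== SOURCE B (Python) =====
-- def get_conflicts_for_k(points, k):
--     """Bucket points by y, x and by exact position, then only compare points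
--     sharing a coordinate (same result as the all-pairs scan)."""
--     by_y = {}
--     by_x = {}
--     by_p = {}
--     for i, (x, y) in enumerate(points):
--         by_y.setdefault(y, []).append((x, i))
--         by_x.setdefault(x, []).append((y, i))
--         by_p.setdefault((x, y), []).append(i)
--
--     w = 2 * k + 1
--     h_conflicts = set()
--     v_conflicts = set()
--     impossible_pairs = set()
--
--     for i, (x, y) in enumerate(points):
--         for x2, j in by_y[y]:
--             if j > i and x2 != x and abs(x - x2) < w:
--                 h_conflicts.add((i, j))
--         for y2, j in by_x[x]:
--             if j > i and y2 != y and abs(y - y2) < w: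
--                 v_conflicts.add((i, j))
--
--     if w > 0:
--         for i, (x, y) in enumerate(points):
--             for j in by_p[(x, y)]:
--                 if j > i:
--                     impossible_pairs.add((i, j))
--
--     return (h_conflicts, v_conflicts, impossible_pairs)
-- ===== Notes on version B (the rewrite author's own statement) =====
-- stated objective: faster
-- what changed: B buckets the points by y, by x and by exact position in one preliminary pass (dicts of index lists), then compares each point only against the members of its own coordinate bucket, instead of A's all-pairs double loop over every index pair; equivalence is about the return value only (A additionally reads/updates a module-level memo cache keyed by the sorted points, which the pure port ignores).
import Mathlib
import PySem

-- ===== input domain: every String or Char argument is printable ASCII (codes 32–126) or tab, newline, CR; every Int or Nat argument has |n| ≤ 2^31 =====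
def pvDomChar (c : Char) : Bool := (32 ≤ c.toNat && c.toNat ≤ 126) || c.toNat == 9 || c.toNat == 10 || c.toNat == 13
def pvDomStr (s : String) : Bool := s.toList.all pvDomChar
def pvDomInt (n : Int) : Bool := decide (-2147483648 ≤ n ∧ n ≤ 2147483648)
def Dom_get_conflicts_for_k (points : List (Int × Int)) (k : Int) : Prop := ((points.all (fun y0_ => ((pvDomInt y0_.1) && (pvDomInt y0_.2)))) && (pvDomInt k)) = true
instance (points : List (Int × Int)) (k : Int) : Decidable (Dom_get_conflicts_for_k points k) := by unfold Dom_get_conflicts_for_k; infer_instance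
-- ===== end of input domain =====

-- B replaces A's all-pairs double loop by coordinate buckets (dict y→points, x→points, position→indices)
-- and only compares points sharing a coordinate; equivalence is about the RETURN value only — A's
-- module-level memo cache `_conflict_cache` (a cross-call side effect) and its unused sorted cache key
-- are not part of the pure port.

-- ===== PORT A =====
-- body of A's inner loop over j (for fixed i): reads points[i], points[j] (always in range) and
-- adds (i, j) to the matching set of the state (h_conflicts, v_conflicts, impossible_pairs)
def pvStepA (points : List (Int × Int)) (k i : Int)
    (st : List (Int × Int) × List (Int × Int) × List (Int × Int)) (j : Int) :
    List (Int × Int) × List (Int × Int) × List (Int × Int) :=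
  let p1 := PySem.List.pyGetD points i ((0 : Int), (0 : Int))
  let p2 := PySem.List.pyGetD points j ((0 : Int), (0 : Int))
  let h_conflict := p1.2 == p2.2 && decide (|p1.1 - p2.1| < 2 * k + 1)
  let v_conflict := p1.1 == p2.1 && decide (|p1.2 - p2.2| < 2 * k + 1)
  if h_conflict && v_conflict then (st.1, st.2.1, PySem.Set.add st.2.2 (i, j))
  else if h_conflict then (PySem.Set.add st.1 (i, j), st.2.1, st.2.2)
  else if v_conflict then (st.1, PySem.Set.add st.2.1 (i, j), st.2.2)
  else st

def get_conflicts_for_k (points : List (Int × Int)) (k : Int) :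
    (List (Int × Int)) × (List (Int × Int)) × (List (Int × Int)) :=
  let n : Int := points.length
  (PySem.List.pyRange 0 n 1).foldl
    (fun st i => (PySem.List.pyRange (i + 1) n 1).foldl (pvStepA points k i) st)
    ([], [], [])

-- ===== PORT B =====
-- first pass of B: by_y.setdefault(y, []).append((x, i)); by_x.setdefault(x, []).append((y, i));
-- by_p.setdefault((x, y), []).append(i)
def pvBuckets (points : List (Int × Int)) :
    PySem.Dict Int (List (Int × Int)) × PySem.Dict Int (List (Int × Int)) ×
      PySem.Dict (Int × Int) (List Int) :=
  (PySem.List.enumerate points 0).foldl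
    (fun ds p =>
      (ds.1.modify p.2.2 [] (· ++ [(p.2.1, p.1)]),
       ds.2.1.modify p.2.1 [] (· ++ [(p.2.2, p.1)]),
       ds.2.2.modify p.2 [] (· ++ [p.1])))
    (PySem.Dict.empty, PySem.Dict.empty, PySem.Dict.empty)

def get_conflicts_for_k_alt (points : List (Int × Int)) (k : Int) :
    (List (Int × Int)) × (List (Int × Int)) × (List (Int × Int)) :=
  let ds := pvBuckets points
  let by_y := ds.1
  let by_x := ds.2.1
  let by_p := ds.2.2
  let w := 2 * k + 1
  let hv := (PySem.List.enumerate points 0).foldl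
    (fun st p =>
      ((by_y.getD p.2.2 []).foldl
        (fun s q =>
          if decide (q.2 > p.1) && !(q.1 == p.2.1) && decide (|p.2.1 - q.1| < w) then
            PySem.Set.add s (p.1, q.2) else s) st.1,
       (by_x.getD p.2.1 []).foldl
        (fun s q =>
          if decide (q.2 > p.1) && !(q.1 == p.2.2) && decide (|p.2.2 - q.1| < w) then
            PySem.Set.add s (p.1, q.2) else s) st.2))
    ([], [])
  let imp := if decide (w > 0) then
      (PySem.List.enumerate points 0).foldl
        (fun s p =>
          (by_p.getD p.2 []).foldl
            (fun s j => if decide (j > p.1) then PySem.Set.add s (p.1, j) else s) s)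
        []
    else []
  (hv.1, hv.2, imp)

-- ===== PRECONDITION & SPEC =====
def Spec_get_conflicts_for_k (points : List (Int × Int)) (k : Int) (out : (List (Int × Int)) × (List (Int × Int)) × (List (Int × Int))) : Prop := out = get_conflicts_for_k_alt points k
instance (points : List (Int × Int)) (k : Int) (out : (List (Int × Int)) × (List (Int × Int)) × (List (Int × Int))) : Decidable (Spec_get_conflicts_for_k points k out) := by unfold Spec_get_conflicts_for_k; infer_instance

-- ===== CLAIM (what is proved, stated in full; the proofs are below) =====
def Claim_equal_get_conflicts_for_k : Prop := ∀ (points : List (Int × Int)) (k : Int), Dom_get_conflicts_for_k points k → Spec_get_conflicts_for_k points k (get_conflicts_for_k points k)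

-- ===== LEMMAS AND PROOFS =====

-- shorthand: points[j] as A and B both read it (always in range where used)
def pvPt (points : List (Int × Int)) (j : Int) : Int × Int :=
  PySem.List.pyGetD points j ((0 : Int), (0 : Int))

-- A's three classification conditions at the pair (i, j)
def pvHC (points : List (Int × Int)) (k i j : Int) : Bool :=
  (pvPt points i).2 == (pvPt points j).2 &&
    decide (|(pvPt points i).1 - (pvPt points j).1| < 2 * k + 1)

def pvVC (points : List (Int × Int)) (k i j : Int) : Bool :=
  (pvPt points i).1 == (pvPt points j).1 &&
    decide (|(pvPt points i).2 - (pvPt points j).2| < 2 * k + 1)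

-- the list a whole nested "for i in l: for j in r i: if p i j: s.add((i,j))" loop produces
def pvRows (l : List Int) (r : Int → List Int) (p : Int → Int → Bool) : List (Int × Int) :=
  l.flatMap (fun i => ((r i).filter (p i)).map (fun j => (i, j)))

theorem pv_set_row (i : Int) (l : List Int) (p : Int → Bool) (acc : List (Int × Int))
    (hl : l.Nodup) (hfresh : ∀ j ∈ l, ((i, j) : Int × Int) ∉ acc) :
    l.foldl (fun s j => if p j then PySem.Set.add s (i, j) else s) acc
      = acc ++ (l.filter p).map (fun j => (i, j)) := by
  induction l generalizing acc with
  | nil => simp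
  | cons j t ih =>
    rcases List.nodup_cons.mp hl with ⟨hjt, hnt⟩
    simp only [List.foldl_cons]
    by_cases hp : p j
    · have hfresh' : ∀ j' ∈ t, ((i, j') : Int × Int) ∉ acc ++ [(i, j)] := by
        intro j' hj' hmem
        rcases List.mem_append.mp hmem with h | h
        · exact hfresh j' (by simp [hj']) h
        · simp at h
          exact hjt (h ▸ hj')
      rw [if_pos hp, PySem.Set.add_of_not_mem (hfresh j (by simp)),
        ih (acc ++ [(i, j)]) hnt hfresh']
      simp [hp]
    · rw [if_neg hp, ih acc hnt (fun j' hj' => hfresh j' (by simp [hj']))]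
      simp [hp]

theorem pv_set_outer (l : List Int) (r : Int → List Int) (p : Int → Int → Bool)
    (acc : List (Int × Int)) (hl : l.Nodup) (hr : ∀ i, (r i).Nodup)
    (hacc : ∀ q ∈ acc, q.1 ∉ l) :
    l.foldl (fun acc i =>
        (r i).foldl (fun s j => if p i j then PySem.Set.add s (i, j) else s) acc) acc
      = acc ++ pvRows l r p := by
  induction l generalizing acc with
  | nil => simp [pvRows]
  | cons i t ih =>
    rcases List.nodup_cons.mp hl with ⟨hit, hnt⟩
    simp only [List.foldl_cons]
    rw [pv_set_row i (r i) (p i) acc (hr i)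
      (fun j hj hmem => (hacc _ hmem) (by simp))]
    have hacc' : ∀ q ∈ acc ++ ((r i).filter (p i)).map (fun j => ((i : Int), j)), q.1 ∉ t := by
      intro q hq
      rcases List.mem_append.mp hq with h | h
      · intro hqt; exact hacc q h (by simp [hqt])
      · rcases List.mem_map.mp h with ⟨j, _, rfl⟩
        simpa using hit
    rw [ih (acc ++ ((r i).filter (p i)).map (fun j => ((i : Int), j))) hnt hacc']
    simp [pvRows]

theorem pvStepA_eq (points : List (Int × Int)) (k i : Int)
    (st : List (Int × Int) × List (Int × Int) × List (Int × Int)) (j : Int) :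
    pvStepA points k i st j =
      (if pvHC points k i j && !pvVC points k i j then PySem.Set.add st.1 (i, j) else st.1,
       if !pvHC points k i j && pvVC points k i j then PySem.Set.add st.2.1 (i, j) else st.2.1,
       if pvHC points k i j && pvVC points k i j then PySem.Set.add st.2.2 (i, j) else st.2.2) := by
  simp only [pvStepA]
  rw [show ((PySem.List.pyGetD points i ((0 : Int), (0 : Int))).2 ==
        (PySem.List.pyGetD points j ((0 : Int), (0 : Int))).2 &&
        decide (|(PySem.List.pyGetD points i ((0 : Int), (0 : Int))).1 -
          (PySem.List.pyGetD points j ((0 : Int), (0 : Int))).1| < 2 * k + 1))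
      = pvHC points k i j from rfl,
    show ((PySem.List.pyGetD points i ((0 : Int), (0 : Int))).1 ==
        (PySem.List.pyGetD points j ((0 : Int), (0 : Int))).1 &&
        decide (|(PySem.List.pyGetD points i ((0 : Int), (0 : Int))).2 -
          (PySem.List.pyGetD points j ((0 : Int), (0 : Int))).2| < 2 * k + 1))
      = pvVC points k i j from rfl]
  cases hH : pvHC points k i j <;> cases hV : pvVC points k i j <;> simp

theorem pv_triple_outer (l : List Int) (r : Int → List Int) (p1 p2 p3 : Int → Int → Bool)
    (hl : l.Nodup) (hr : ∀ i, (r i).Nodup) :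
    l.foldl (fun st i => (r i).foldl (fun st j =>
        (if p1 i j then PySem.Set.add st.1 (i, j) else st.1,
         if p2 i j then PySem.Set.add st.2.1 (i, j) else st.2.1,
         if p3 i j then PySem.Set.add st.2.2 (i, j) else st.2.2)) st)
      (([], [], []) : List (Int × Int) × List (Int × Int) × List (Int × Int))
    = (pvRows l r p1, pvRows l r p2, pvRows l r p3) := by
  have hinner : ∀ (i : Int) (st : List (Int × Int) × List (Int × Int) × List (Int × Int)),
      (r i).foldl (fun st j =>
        (if p1 i j then PySem.Set.add st.1 (i, j) else st.1,
         if p2 i j then PySem.Set.add st.2.1 (i, j) else st.2.1,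
         if p3 i j then PySem.Set.add st.2.2 (i, j) else st.2.2)) st
      = ((r i).foldl (fun s j => if p1 i j then PySem.Set.add s (i, j) else s) st.1,
         (r i).foldl (fun s j => if p2 i j then PySem.Set.add s (i, j) else s) st.2.1,
         (r i).foldl (fun s j => if p3 i j then PySem.Set.add s (i, j) else s) st.2.2) := by
    intro i st
    obtain ⟨a, b, c⟩ := st
    rw [PySem.List.foldl_prod_mk
      (f := fun s j => if p1 i j then PySem.Set.add s (i, j) else s)
      (g := fun s2 j => (if p2 i j then PySem.Set.add s2.1 (i, j) else s2.1,
                         if p3 i j then PySem.Set.add s2.2 (i, j) else s2.2))]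
    rw [PySem.List.foldl_prod_mk
      (f := fun s j => if p2 i j then PySem.Set.add s (i, j) else s)
      (g := fun s j => if p3 i j then PySem.Set.add s (i, j) else s)]
  simp only [hinner]
  rw [PySem.List.foldl_prod_mk
    (f := fun s i => (r i).foldl (fun s j => if p1 i j then PySem.Set.add s (i, j) else s) s)
    (g := fun s2 i => ((r i).foldl (fun s j => if p2 i j then PySem.Set.add s (i, j) else s) s2.1,
                       (r i).foldl (fun s j => if p3 i j then PySem.Set.add s (i, j) else s) s2.2))]
  rw [PySem.List.foldl_prod_mk
    (f := fun s i => (r i).foldl (fun s j => if p2 i j then PySem.Set.add s (i, j) else s) s)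
    (g := fun s i => (r i).foldl (fun s j => if p3 i j then PySem.Set.add s (i, j) else s) s)]
  rw [pv_set_outer l r p1 [] hl hr (by simp), pv_set_outer l r p2 [] hl hr (by simp),
    pv_set_outer l r p3 [] hl hr (by simp)]
  simp

-- A's fold equals three row lists
theorem pvA_eq (points : List (Int × Int)) (k : Int) :
    get_conflicts_for_k points k =
      (pvRows (PySem.List.pyRange 0 (points.length : Int) 1)
          (fun i => PySem.List.pyRange (i + 1) (points.length : Int) 1)
          (fun i j => pvHC points k i j && !pvVC points k i j),
       pvRows (PySem.List.pyRange 0 (points.length : Int) 1)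
          (fun i => PySem.List.pyRange (i + 1) (points.length : Int) 1)
          (fun i j => !pvHC points k i j && pvVC points k i j),
       pvRows (PySem.List.pyRange 0 (points.length : Int) 1)
          (fun i => PySem.List.pyRange (i + 1) (points.length : Int) 1)
          (fun i j => pvHC points k i j && pvVC points k i j)) := by
  unfold get_conflicts_for_k
  have hstep : ∀ i, pvStepA points k i = fun st j =>
      (if pvHC points k i j && !pvVC points k i j then PySem.Set.add st.1 (i, j) else st.1,
       if !pvHC points k i j && pvVC points k i j then PySem.Set.add st.2.1 (i, j) else st.2.1,
       if pvHC points k i j && pvVC points k i j then PySem.Set.add st.2.2 (i, j) else st.2.2) :=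
    fun i => funext fun st => funext fun j => pvStepA_eq points k i st j
  simp only [hstep]
  exact pv_triple_outer _ _ _ _ _ (PySem.List.nodup_pyRange_one _ _)
    (fun i => PySem.List.nodup_pyRange_one _ _)

theorem pv_foldl_modify_key {κ β : Type} [BEq κ] [LawfulBEq κ]
    (l : List Int) (key : Int → κ) (val : Int → β) (d : PySem.Dict κ (List β)) (c : κ) :
    (l.foldl (fun d j => PySem.Dict.modify d (key j) [] (· ++ [val j])) d).getD c []
      = d.getD c [] ++ (l.filter (fun j => key j == c)).map val := by
  have h := PySem.Dict.getD_foldl_modify_append (l := l.map (fun j => (key j, val j)))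
    (d := d) (c := c)
  simpa [List.foldl_map, List.filter_map, List.map_map, Function.comp_def] using h

theorem pvBuckets_eq (points : List (Int × Int)) :
    pvBuckets points =
      ((PySem.List.enumerate points 0).foldl
          (fun d p => d.modify p.2.2 [] (· ++ [(p.2.1, p.1)])) PySem.Dict.empty,
       (PySem.List.enumerate points 0).foldl
          (fun d p => d.modify p.2.1 [] (· ++ [(p.2.2, p.1)])) PySem.Dict.empty,
       (PySem.List.enumerate points 0).foldl
          (fun d p => d.modify p.2 [] (· ++ [p.1])) PySem.Dict.empty) := by
  unfold pvBuckets
  rw [PySem.List.foldl_prod_mk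
    (f := fun (d : PySem.Dict Int (List (Int × Int))) (p : Int × Int × Int) =>
      d.modify p.2.2 [] (· ++ [(p.2.1, p.1)]))
    (g := fun (ds2 : PySem.Dict Int (List (Int × Int)) × PySem.Dict (Int × Int) (List Int))
        (p : Int × Int × Int) =>
      (ds2.1.modify p.2.1 [] (· ++ [(p.2.2, p.1)]), ds2.2.modify p.2 [] (· ++ [p.1])))]
  rw [PySem.List.foldl_prod_mk
    (f := fun (d : PySem.Dict Int (List (Int × Int))) (p : Int × Int × Int) =>
      d.modify p.2.1 [] (· ++ [(p.2.2, p.1)]))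
    (g := fun (d : PySem.Dict (Int × Int) (List Int)) (p : Int × Int × Int) =>
      d.modify p.2 [] (· ++ [p.1]))]

-- the three buckets, characterised
theorem pv_by_y (points : List (Int × Int)) (c : Int) :
    (pvBuckets points).1.getD c []
      = ((PySem.List.pyRange 0 (points.length : Int) 1).filter
            (fun j => (pvPt points j).2 == c)).map (fun j => ((pvPt points j).1, j)) := by
  rw [pvBuckets_eq]
  simp only [PySem.List.enumerate_eq_map_pyRange points ((0 : Int), (0 : Int)), List.foldl_map]
  rw [pv_foldl_modify_key _ (fun j => (PySem.List.pyGetD points j ((0 : Int), (0 : Int))).2) (fun j => ((PySem.List.pyGetD points j ((0 : Int), (0 : Int))).1, j)) PySem.Dict.empty c]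
  simp [pvPt]

theorem pv_by_x (points : List (Int × Int)) (c : Int) :
    (pvBuckets points).2.1.getD c []
      = ((PySem.List.pyRange 0 (points.length : Int) 1).filter
            (fun j => (pvPt points j).1 == c)).map (fun j => ((pvPt points j).2, j)) := by
  rw [pvBuckets_eq]
  simp only [PySem.List.enumerate_eq_map_pyRange points ((0 : Int), (0 : Int)), List.foldl_map]
  rw [pv_foldl_modify_key _ (fun j => (PySem.List.pyGetD points j ((0 : Int), (0 : Int))).1) (fun j => ((PySem.List.pyGetD points j ((0 : Int), (0 : Int))).2, j)) PySem.Dict.empty c]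
  simp [pvPt]

theorem pv_by_p (points : List (Int × Int)) (c : Int × Int) :
    (pvBuckets points).2.2.getD c []
      = (PySem.List.pyRange 0 (points.length : Int) 1).filter
            (fun j => pvPt points j == c) := by
  rw [pvBuckets_eq]
  simp only [PySem.List.enumerate_eq_map_pyRange points ((0 : Int), (0 : Int)), List.foldl_map]
  rw [pv_foldl_modify_key _ (fun j => PySem.List.pyGetD points j ((0 : Int), (0 : Int))) (fun j => j) PySem.Dict.empty c]
  simp [pvPt]

theorem pv_pair_outer (l : List Int) (r1 r2 : Int → List Int) (p1 p2 : Int → Int → Bool)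
    (hl : l.Nodup) (hr1 : ∀ i, (r1 i).Nodup) (hr2 : ∀ i, (r2 i).Nodup) :
    l.foldl (fun st i =>
        ((r1 i).foldl (fun s j => if p1 i j then PySem.Set.add s (i, j) else s) st.1,
         (r2 i).foldl (fun s j => if p2 i j then PySem.Set.add s (i, j) else s) st.2))
      (([], []) : List (Int × Int) × List (Int × Int))
    = (pvRows l r1 p1, pvRows l r2 p2) := by
  rw [PySem.List.foldl_prod_mk
    (f := fun s i => (r1 i).foldl (fun s j => if p1 i j then PySem.Set.add s (i, j) else s) s)
    (g := fun s i => (r2 i).foldl (fun s j => if p2 i j then PySem.Set.add s (i, j) else s) s)]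
  rw [pv_set_outer l r1 p1 [] hl hr1 (by simp), pv_set_outer l r2 p2 [] hl hr2 (by simp)]
  simp

-- B's folds equal three row lists
theorem pvB_eq (points : List (Int × Int)) (k : Int) :
    get_conflicts_for_k_alt points k =
      (pvRows (PySem.List.pyRange 0 (points.length : Int) 1)
          (fun i => (PySem.List.pyRange 0 (points.length : Int) 1).filter
              (fun j => (pvPt points j).2 == (pvPt points i).2))
          (fun i j => decide (j > i) && !((pvPt points j).1 == (pvPt points i).1) &&
              decide (|(pvPt points i).1 - (pvPt points j).1| < 2 * k + 1)),
       pvRows (PySem.List.pyRange 0 (points.length : Int) 1)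
          (fun i => (PySem.List.pyRange 0 (points.length : Int) 1).filter
              (fun j => (pvPt points j).1 == (pvPt points i).1))
          (fun i j => decide (j > i) && !((pvPt points j).2 == (pvPt points i).2) &&
              decide (|(pvPt points i).2 - (pvPt points j).2| < 2 * k + 1)),
       if decide (2 * k + 1 > 0) then
         pvRows (PySem.List.pyRange 0 (points.length : Int) 1)
            (fun i => (PySem.List.pyRange 0 (points.length : Int) 1).filter
                (fun j => pvPt points j == pvPt points i))
            (fun i j => decide (j > i))
       else []) := by
  unfold get_conflicts_for_k_alt
  simp only [pv_by_y, pv_by_x, pv_by_p,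
    PySem.List.enumerate_eq_map_pyRange points ((0 : Int), (0 : Int)), List.foldl_map, pvPt]
  rw [pv_pair_outer _ _ _ _ _ (PySem.List.nodup_pyRange_one _ _)
    (fun i => List.Nodup.filter _ (PySem.List.nodup_pyRange_one _ _))
    (fun i => List.Nodup.filter _ (PySem.List.nodup_pyRange_one _ _))]
  rw [pv_set_outer _ _ _ [] (PySem.List.nodup_pyRange_one _ _)
    (fun i => List.Nodup.filter _ (PySem.List.nodup_pyRange_one _ _)) (by simp)]
  simp

theorem pvRows_congr (l : List Int) (r1 r2 : Int → List Int) (p1 p2 : Int → Int → Bool)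
    (h : ∀ i ∈ l, (r1 i).filter (p1 i) = (r2 i).filter (p2 i)) :
    pvRows l r1 p1 = pvRows l r2 p2 := by
  unfold pvRows
  induction l with
  | nil => rfl
  | cons i t ih =>
    simp only [List.flatMap_cons]
    rw [h i (by simp), ih (fun i' hi' => h i' (by simp [hi']))]

theorem pv_filter_eq (n i : Int) (h0 : 0 ≤ i) (hn : i < n) (pB pA : Int → Bool)
    (hlow : ∀ j, 0 ≤ j → j ≤ i → pB j = false)
    (hhigh : ∀ j, i < j → j < n → pB j = pA j) :
    (PySem.List.pyRange 0 n 1).filter pB = (PySem.List.pyRange (i + 1) n 1).filter pA := by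
  rw [PySem.List.pyRange_one_append 0 (i + 1) n (by omega) (by omega), List.filter_append]
  have h1 : (PySem.List.pyRange 0 (i + 1) 1).filter pB = [] :=
    List.filter_eq_nil_iff.mpr (fun j hj => by
      obtain ⟨a, b⟩ := PySem.List.mem_pyRange_one.mp hj
      simp [hlow j a (by omega)])
  rw [h1, List.nil_append]
  exact List.filter_congr (fun j hj => by
    obtain ⟨a, b⟩ := PySem.List.mem_pyRange_one.mp hj
    exact hhigh j (by omega) b)

theorem get_conflicts_spec_aux (points : List (Int × Int)) (k : Int) :
    get_conflicts_for_k points k = get_conflicts_for_k_alt points k := by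
  rw [pvA_eq, pvB_eq]
  refine congrArg₂ Prod.mk ?_ (congrArg₂ Prod.mk ?_ ?_)
  · -- h component
    refine (pvRows_congr _ _ _ _ _ ?_).symm
    intro i hi
    obtain ⟨h0, hn⟩ := PySem.List.mem_pyRange_one.mp hi
    rw [List.filter_filter]
    refine pv_filter_eq _ i h0 hn _ _ ?_ ?_
    · intro j ha hb
      simp [decide_eq_false (show ¬ (j > i) by omega)]
    · intro j hij hjn
      rw [Bool.eq_iff_iff]
      simp only [pvHC, pvVC, Bool.and_eq_true, Bool.not_eq_true', beq_iff_eq,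
        beq_eq_false_iff_ne, decide_eq_true_eq, abs_lt, Bool.and_eq_false_iff,
        decide_eq_false_iff_not, ne_eq, not_and, not_lt]
      omega
  · -- v component
    refine (pvRows_congr _ _ _ _ _ ?_).symm
    intro i hi
    obtain ⟨h0, hn⟩ := PySem.List.mem_pyRange_one.mp hi
    rw [List.filter_filter]
    refine pv_filter_eq _ i h0 hn _ _ ?_ ?_
    · intro j ha hb
      simp [decide_eq_false (show ¬ (j > i) by omega)]
    · intro j hij hjn
      rw [Bool.eq_iff_iff]
      simp only [pvHC, pvVC, Bool.and_eq_true, Bool.not_eq_true', beq_iff_eq,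
        beq_eq_false_iff_ne, decide_eq_true_eq, abs_lt, Bool.and_eq_false_iff,
        decide_eq_false_iff_not, ne_eq, not_and, not_lt]
      omega
  · -- impossible component
    by_cases hw : 2 * k + 1 > 0
    · rw [if_pos (by simpa using hw)]
      refine (pvRows_congr _ _ _ _ _ ?_).symm
      intro i hi
      obtain ⟨h0, hn⟩ := PySem.List.mem_pyRange_one.mp hi
      rw [List.filter_filter]
      refine pv_filter_eq _ i h0 hn _ _ ?_ ?_
      · intro j ha hb
        simp [decide_eq_false (show ¬ (j > i) by omega)]
      · intro j hij hjn
        rw [Bool.eq_iff_iff]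
        simp only [pvHC, pvVC, Bool.and_eq_true, beq_iff_eq, decide_eq_true_eq, abs_lt,
          Prod.ext_iff]
        constructor
        · rintro ⟨-, hx, hy⟩
          exact ⟨⟨hy.symm, by omega⟩, hx.symm, by omega⟩
        · rintro ⟨⟨hy, -⟩, hx, -⟩
          exact ⟨by omega, hx.symm, hy.symm⟩
    · rw [if_neg (by simpa using hw)]
      unfold pvRows
      refine (List.flatMap_eq_nil_iff.mpr ?_)
      intro i hi
      have : (PySem.List.pyRange (i + 1) (points.length : Int) 1).filter
          (fun j => pvHC points k i j && pvVC points k i j) = [] := by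
        refine List.filter_eq_nil_iff.mpr ?_
        intro j hj
        simp only [pvHC, pvVC, Bool.and_eq_true, beq_iff_eq, decide_eq_true_eq, abs_lt, not_and]
        intro _ hdx
        omega
      rw [this]
      rfl

-- ===== VERDICT (by name: the statement is the Claim_ definition above) =====
theorem get_conflicts_for_k_spec : Claim_equal_get_conflicts_for_k := by
  intro points k _
  exact get_conflicts_spec_aux points k
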